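-- pv_equiv track=rewrite | github.com/arnonmoscona/toolguard | permissions.py | contains_path_component
-- ===== SOURCE A (Python) =====
-- def contains_path_component(command_str: str, component: str) -> bool:
--     """
--     Check if a command contains a specific path component.
--
--     For example, '.env' as a component in 'cat .env', 'cat dir/.env', 'cat .env/file', etc.
--
--     Args:
--         command_str: The command string to check
--         component: The path component to search for
--
--     Returns:
--         True if the component is found in any path argument, False otherwise
--     """
--     # Remove the command part, focus on arguments
--     parts = command_str.split(None, 1)
--     if len(parts) < 2:
--         return False
--
--     args = parts[1]
--
--     # Check if the component appears as:
--     # - Exact match: "cat .env"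
--     # - After a slash: "cat dir/.env" or "cat /path/.env"
--     # - Before a slash: "cat .env/file"
--     # - In the middle: "cat dir/.env/file"
--
--     # Split args by spaces to handle multiple arguments
--     for arg in args.split():
--         # Split by path separators
--         path_parts = arg.replace('\\', '/').split('/')
--         if component in path_parts:
--             return True
--
--     return False
-- ===== SOURCE B (Python) =====
-- def contains_path_component(command_str: str, component: str) -> bool:
--     # A path component can never contain a path separator or whitespace,
--     # so such a needle can never match.
--     if any(c == '/' or c == '\\' or c.isspace() for c in component):
--         return False
--     parts = command_str.split(None, 1)
--     if len(parts) < 2: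
--         return False
--     normalized = '/' + '/'.join(t.replace('\\', '/') for t in parts[1].split()) + '/'
--     return '/' + component + '/' in normalized
-- ===== Notes on version B (the rewrite author's own statement) =====
-- stated objective: alternative
-- what changed: B replaces A's per-argument split-by-'/'-then-list-membership loop with a single boundary-delimited substring search: it rejects components containing a separator or whitespace outright, joins the normalised arguments with '/' into one sentinel-wrapped string and tests whether '/'+component+'/' occurs in it.
import Mathlib
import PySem

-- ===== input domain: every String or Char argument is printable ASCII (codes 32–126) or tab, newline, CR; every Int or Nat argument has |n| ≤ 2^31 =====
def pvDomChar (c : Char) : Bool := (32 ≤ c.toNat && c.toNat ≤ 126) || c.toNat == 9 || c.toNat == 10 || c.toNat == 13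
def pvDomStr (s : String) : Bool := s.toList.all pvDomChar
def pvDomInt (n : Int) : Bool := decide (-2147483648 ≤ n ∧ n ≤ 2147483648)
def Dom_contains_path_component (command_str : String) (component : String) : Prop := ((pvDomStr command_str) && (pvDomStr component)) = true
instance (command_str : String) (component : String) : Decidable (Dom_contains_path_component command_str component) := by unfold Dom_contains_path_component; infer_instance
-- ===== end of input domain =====

-- B replaces A's per-argument split-then-membership loop by a single boundary-delimited
-- substring search in one '/'-normalised arguments string (objective: alternative).

-- ===== PORT A =====
-- parts = command_str.split(None, 1); if len(parts) < 2: return False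
-- for arg in parts[1].split(): if component in arg.replace('\\','/').split('/'): return True
def contains_path_component (command_str : String) (component : String) : Bool :=
  let parts := PySem.Chars.split₀Max command_str.toList 1
  if parts.length < 2 then false
  else
    (PySem.Chars.split₀ parts[1]!).any fun arg =>
      ((PySem.Chars.splitOn (PySem.Chars.replace arg ['\\'] ['/']) ['/']).contains component.toList)

-- ===== PORT B =====
-- if any(c == '/' or c == '\\' or c.isspace() for c in component): return False
-- parts = command_str.split(None, 1); if len(parts) < 2: return False
-- normalized = '/' + '/'.join(t.replace('\\', '/') for t in parts[1].split()) + '/'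
-- return '/' + component + '/' in normalized
def contains_path_component_alt (command_str : String) (component : String) : Bool :=
  let c := component.toList
  if c.any (fun ch => ch == '/' || ch == '\\' || PySem.Chars.isspace ch) then false
  else
    let parts := PySem.Chars.split₀Max command_str.toList 1
    if parts.length < 2 then false
    else
      let normalized := '/' :: (PySem.Chars.join ['/']
        ((PySem.Chars.split₀ parts[1]!).map (fun t => PySem.Chars.replace t ['\\'] ['/']))) ++ ['/']
      PySem.Chars.isIn ('/' :: c ++ ['/']) normalized

-- ===== PRECONDITION & SPEC =====
def Spec_contains_path_component (command_str : String) (component : String) (out : Bool) : Prop := out = contains_path_component_alt command_str component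
instance (command_str : String) (component : String) (out : Bool) : Decidable (Spec_contains_path_component command_str component out) := by unfold Spec_contains_path_component; infer_instance

-- ===== CLAIM (what is proved, stated in full; the proofs are below) =====
def Claim_equal_contains_path_component : Prop := ∀ (command_str : String) (component : String), Dom_contains_path_component command_str component → Spec_contains_path_component command_str component (contains_path_component command_str component)

-- ===== LEMMAS AND PROOFS =====

-- str.replace with a one-character old/new is a character map
theorem replace_go_single (a b : Char) (l : List Char) (acc : List Char) (fuel : Nat)
    (h : l.length ≤ fuel) :
    PySem.Chars.replace.go [a] [b] fuel l acc
      = acc.reverse ++ l.map (fun c => if c = a then b else c) := by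
  induction l generalizing acc fuel with
  | nil => cases fuel <;> simp [PySem.Chars.replace.go]
  | cons c t ih =>
    cases fuel with
    | zero => simp at h
    | succ n =>
      simp only [PySem.Chars.replace.go]
      by_cases hca : c = a
      · have hp : List.isPrefixOf [a] (c :: t) = true := by simp [List.isPrefixOf, hca]
        simp only [hp, if_pos, List.length_cons, List.drop_succ_cons, List.length_nil,
          List.drop_zero, List.reverse_cons, List.reverse_nil, List.nil_append]
        rw [show ([b] ++ acc : List Char) = b :: acc from rfl, ih (b :: acc) n (by simpa using h)]
        simp [hca]
      · have hp : List.isPrefixOf [a] (c :: t) = false := by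
          simp only [List.isPrefixOf, Bool.and_eq_false_iff]
          left; simpa using fun hh => hca hh.symm
        simp only [hp, Bool.false_eq_true, if_false]
        rw [ih (c :: acc) n (by simpa using h)]
        simp [hca]

theorem replace_single (a b : Char) (l : List Char) :
    PySem.Chars.replace l [a] [b] = l.map (fun c => if c = a then b else c) := by
  rw [PySem.Chars.replace]
  simp only [List.isEmpty_cons, Bool.false_eq_true, if_false]
  simpa using replace_go_single a b l [] l.length le_rfl

-- Chars.splitOn with a one-character separator is List.splitOnP
theorem splitOn_go_char (sep : Char) (fuel : Nat) (l cur : List Char) (acc : List (List Char))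
    (h : l.length < fuel) :
    PySem.Chars.splitOn.go [sep] fuel l cur acc
      = acc.reverse ++ List.modifyHead (cur.reverse ++ ·) (List.splitOnP (fun c => c == sep) l) := by
  induction l generalizing fuel cur acc with
  | nil =>
    cases fuel with
    | zero => simp at h
    | succ n => simp [PySem.Chars.splitOn.go, List.splitOnP_nil]
  | cons c t ih =>
    cases fuel with
    | zero => simp at h
    | succ n =>
      simp only [PySem.Chars.splitOn.go]
      by_cases hcs : c = sep
      · have hp : List.isPrefixOf [sep] (c :: t) = true := by simp [List.isPrefixOf, hcs]
        simp only [hp, if_pos, List.length_cons, List.length_nil, List.drop_succ_cons,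
          List.drop_zero]
        rw [ih n [] (cur.reverse :: acc) (by simpa using h)]
        rcases hsp : List.splitOnP (fun c => c == sep) t with _ | ⟨hd, tl⟩
        · exact absurd hsp (List.splitOnP_ne_nil _ _)
        · simp [List.splitOnP_cons, hcs, hsp]
      · have hp : List.isPrefixOf [sep] (c :: t) = false := by
          simp only [List.isPrefixOf, Bool.and_eq_false_iff]
          left; simpa using fun hh => hcs hh.symm
        simp only [hp, Bool.false_eq_true, if_false]
        rw [ih n (c :: cur) acc (by simpa using h)]
        have hps : (c == sep) = false := by simpa using hcs
        simp only [List.splitOnP_cons, hps, Bool.false_eq_true, if_false]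
        rcases hsp : List.splitOnP (fun c => c == sep) t with _ | ⟨hd, tl⟩
        · exact absurd hsp (List.splitOnP_ne_nil _ _)
        · simp [List.modifyHead]

theorem splitOn_char (l : List Char) (sep : Char) :
    PySem.Chars.splitOn l [sep] = List.splitOnP (fun c => c == sep) l := by
  rw [PySem.Chars.splitOn]
  rw [splitOn_go_char sep (l.length + 1) l [] [] (Nat.lt_succ_self _)]
  rcases hsp : List.splitOnP (fun c => c == sep) l with _ | ⟨hd, tl⟩
  · exact absurd hsp (List.splitOnP_ne_nil _ _)
  · simp

-- every piece of splitOnP is p-free and char-wise contained in the source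
theorem mem_splitOnP_not (p : Char → Bool) (l x : List Char) (hx : x ∈ List.splitOnP p l) :
    ∀ ch ∈ x, p ch = false := by
  induction l generalizing x with
  | nil => simp [List.splitOnP_nil] at hx; simp [hx]
  | cons c t ih =>
    rw [List.splitOnP_cons] at hx
    by_cases hp : p c
    · simp [hp] at hx
      rcases hx with h | h
      · simp [h]
      · exact ih x h
    · simp [hp] at hx
      rcases hsp : List.splitOnP p t with _ | ⟨hd, tl⟩
      · exact absurd hsp (List.splitOnP_ne_nil _ _)
      · rw [hsp] at hx
        simp [List.modifyHead] at hx
        rcases hx with h | h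
        · subst h
          intro ch hch
          rcases List.mem_cons.mp hch with h | h
          · simpa [h] using hp
          · exact ih hd (by simp [hsp]) ch h
        · exact ih x (by simp [hsp, h])

theorem mem_splitOnP_subset (p : Char → Bool) (l x : List Char) (hx : x ∈ List.splitOnP p l)
    (ch : Char) (hch : ch ∈ x) : ch ∈ l := by
  induction l generalizing x with
  | nil => simp [List.splitOnP_nil] at hx; simp [hx] at hch
  | cons c t ih =>
    rw [List.splitOnP_cons] at hx
    by_cases hp : p c
    · simp [hp] at hx
      rcases hx with h | h
      · simp [h] at hch
      · exact List.mem_cons_of_mem _ (ih x h hch)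
    · simp [hp] at hx
      rcases hsp : List.splitOnP p t with _ | ⟨hd, tl⟩
      · exact absurd hsp (List.splitOnP_ne_nil _ _)
      · rw [hsp] at hx
        simp [List.modifyHead] at hx
        rcases hx with h | h
        · subst h
          rcases List.mem_cons.mp hch with h | h
          · simp [h]
          · exact List.mem_cons_of_mem _ (ih hd (by simp [hsp]) h)
        · exact List.mem_cons_of_mem _ (ih x (by simp [hsp, h]) hch)

-- splitOnP cuts at an explicit separator
theorem splitOnP_append_sep (a b : List Char) :
    List.splitOnP (fun c => c == '/') (a ++ '/' :: b)
      = List.splitOnP (fun c => c == '/') a ++ List.splitOnP (fun c => c == '/') b := by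
  induction a with
  | nil => simp [List.splitOnP_cons, List.splitOnP_nil]
  | cons c t ih =>
    by_cases hp : c = '/'
    · simp [List.splitOnP_cons, hp, ih]
    · have hb : (c == '/') = false := by simpa using hp
      simp only [List.cons_append, List.splitOnP_cons, hb, Bool.false_eq_true, if_false, ih]
      rcases hsp : List.splitOnP (fun c => c == '/') t with _ | ⟨hd, tl⟩
      · exact absurd hsp (List.splitOnP_ne_nil _ _)
      · simp [List.modifyHead]

theorem splitOnP_intercalate (reps : List (List Char)) (h : reps ≠ []) :
    List.splitOnP (fun c => c == '/') (List.intercalate ['/'] reps)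
      = reps.flatMap (fun r => List.splitOnP (fun c => c == '/') r) := by
  induction reps with
  | nil => simp at h
  | cons r rest ih =>
    cases rest with
    | nil => simp [List.intercalate]
    | cons r2 rest2 =>
      have hic : List.intercalate ['/'] (r :: r2 :: rest2)
          = r ++ '/' :: List.intercalate ['/'] (r2 :: rest2) := by
        simp [List.intercalate, List.intersperse]
      rw [hic, splitOnP_append_sep, ih (by simp)]
      simp

-- "c ++ '/' is a prefix" reads off the first '/'-segment
theorem prefix_slash_iff (c : List Char) (hc : ∀ ch ∈ c, ch ≠ '/') : ∀ (r : List Char),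
    (c ++ ['/'] <+: r) ↔ ∃ tl, List.splitOnP (fun x => x == '/') r = c :: tl ∧ tl ≠ [] := by
  induction c with
  | nil =>
    intro r
    cases r with
    | nil => simp [List.splitOnP_nil]
    | cons y r' =>
      rw [List.splitOnP_cons]
      by_cases hy : y = '/'
      · simp [hy, List.cons_prefix_cons, List.splitOnP_ne_nil]
      · have hb : (y == '/') = false := by simpa using hy
        simp only [hb, Bool.false_eq_true, if_false, List.nil_append, List.cons_prefix_cons]
        rcases hsp : List.splitOnP (fun x => x == '/') r' with _ | ⟨hd, tl⟩
        · exact absurd hsp (List.splitOnP_ne_nil _ _)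
        · simp only [List.modifyHead]
          constructor
          · rintro ⟨h, -⟩; exact absurd h.symm hy
          · rintro ⟨tl2, htl2, -⟩
            injection htl2 with h1 h2
            simp at h1
  | cons a c' ih =>
    intro r
    have ha : a ≠ '/' := hc a (by simp)
    have ih' := ih (fun ch hch => hc ch (by simp [hch]))
    cases r with
    | nil =>
      constructor
      · intro h; exact absurd (List.eq_nil_of_prefix_nil h) (by simp)
      · rintro ⟨tl, htl, -⟩
        rw [List.splitOnP_nil] at htl
        simp at htl
    | cons y r' =>
      rw [List.splitOnP_cons]
      by_cases hy : y = '/'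
      · subst hy
        simp only [beq_self_eq_true, if_pos]
        constructor
        · intro h
          rw [List.cons_append, List.cons_prefix_cons] at h
          exact absurd h.1 ha
        · rintro ⟨tl, htl, -⟩
          simp at htl
      · have hb : (y == '/') = false := by simpa using hy
        simp only [hb, Bool.false_eq_true, if_false, List.cons_append, List.cons_prefix_cons]
        rcases hsp : List.splitOnP (fun x => x == '/') r' with _ | ⟨hd, tl⟩
        · exact absurd hsp (List.splitOnP_ne_nil _ _)
        · rw [ih' r', hsp]
          simp only [List.modifyHead]
          constructor
          · rintro ⟨hya, tl2, htl2, hne⟩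
            injection htl2 with h1 h2
            exact ⟨tl, by rw [hya, h1], by rw [h2]; exact hne⟩
          · rintro ⟨tl2, htl2, hne⟩
            injection htl2 with h1 h2
            injection h1 with h1a h1b
            exact ⟨h1a.symm, tl, by rw [h1b], by rw [h2]; exact hne⟩

-- the boundary lemma: '/c/' occurs in hay iff c is an interior '/'-segment of hay
theorem infix_slash_iff (c : List Char) (hc : ∀ ch ∈ c, ch ≠ '/') : ∀ (hay : List Char),
    (('/' :: (c ++ ['/'])) <:+: hay)
      ↔ c ∈ ((List.splitOnP (fun x => x == '/') hay).drop 1).dropLast := by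
  intro hay
  induction hay with
  | nil => simp [List.splitOnP_nil]
  | cons x r ih =>
    rw [List.infix_cons_iff, List.splitOnP_cons]
    by_cases hx : x = '/'
    · subst hx
      simp only [beq_self_eq_true, if_pos, List.drop_succ_cons, List.drop_zero]
      have hpre : ('/' :: (c ++ ['/'])) <+: '/' :: r ↔ c ++ ['/'] <+: r := by
        simp [List.cons_prefix_cons]
      rw [hpre, prefix_slash_iff c hc r, ih]
      rcases hsp : List.splitOnP (fun x => x == '/') r with _ | ⟨hd, tl0⟩
      · exact absurd hsp (List.splitOnP_ne_nil _ _)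
      · cases tl0 with
        | nil => simp
        | cons z zs =>
          rw [show (hd :: z :: zs).dropLast = hd :: (z :: zs).dropLast from rfl, List.mem_cons]
          constructor
          · rintro (⟨tl, htl, hne⟩ | hmem)
            · injection htl with h1 h2
              exact Or.inl h1.symm
            · exact Or.inr hmem
          · rintro (heq | hmem)
            · exact Or.inl ⟨z :: zs, by rw [heq], by simp⟩
            · exact Or.inr hmem
    · have hb : (x == '/') = false := by simpa using hx
      simp only [hb, Bool.false_eq_true, if_false]
      have hnp : ¬ ('/' :: (c ++ ['/'])) <+: x :: r := by
        rw [List.cons_prefix_cons]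
        rintro ⟨h, -⟩
        exact hx h.symm
      simp only [hnp, false_or]
      rw [ih]
      rcases hsp : List.splitOnP (fun x => x == '/') r with _ | ⟨hd, tl0⟩
      · exact absurd hsp (List.splitOnP_ne_nil _ _)
      · simp [List.modifyHead]

-- split(None) yields whitespace-free tokens, at least one on a non-blank string
theorem split₀_go_no_ws (l : List Char) : ∀ (cur : List Char) (acc : List (List Char)),
    (∀ ch ∈ cur, PySem.Chars.isspace ch = false) →
    (∀ t ∈ acc, ∀ ch ∈ t, PySem.Chars.isspace ch = false) →
    ∀ t ∈ PySem.Chars.split₀.go l cur acc, ∀ ch ∈ t, PySem.Chars.isspace ch = false := by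
  induction l with
  | nil =>
    intro cur acc hcur hacc t ht
    simp only [PySem.Chars.split₀.go] at ht
    split at ht
    · exact hacc t (by simpa using ht)
    · simp only [List.mem_reverse, List.mem_cons] at ht
      rcases ht with h | h
      · subst h; intro ch hch; exact hcur ch (by simpa using hch)
      · exact hacc t h
  | cons c rest ih =>
    intro cur acc hcur hacc t ht
    simp only [PySem.Chars.split₀.go] at ht
    by_cases hws : PySem.Chars.isspace c = true
    · rw [if_pos hws] at ht
      split at ht
      · exact ih [] acc (by simp) hacc t ht
      · refine ih [] (cur.reverse :: acc) (by simp) ?_ t ht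
        intro t' ht' ch hch
        rcases List.mem_cons.mp ht' with h | h
        · subst h; exact hcur ch (by simpa using hch)
        · exact hacc t' h ch hch
    · rw [if_neg hws] at ht
      refine ih (c :: cur) acc ?_ hacc t ht
      intro ch hch
      rcases List.mem_cons.mp hch with h | h
      · subst h; simpa using hws
      · exact hcur ch h

theorem split₀_no_ws (l t : List Char) (ht : t ∈ PySem.Chars.split₀ l) :
    ∀ ch ∈ t, PySem.Chars.isspace ch = false :=
  split₀_go_no_ws l [] [] (by simp) (by simp) t ht

theorem split₀_go_ne_nil (l : List Char) : ∀ (cur : List Char) (acc : List (List Char)),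
    (cur ≠ [] ∨ acc ≠ []) → PySem.Chars.split₀.go l cur acc ≠ [] := by
  induction l with
  | nil =>
    intro cur acc h
    simp only [PySem.Chars.split₀.go]
    split
    · rename_i hcur
      rcases h with h | h
      · simp_all
      · simpa using h
    · simp
  | cons c rest ih =>
    intro cur acc h
    simp only [PySem.Chars.split₀.go]
    by_cases hws : PySem.Chars.isspace c = true
    · rw [if_pos hws]
      split
      · rename_i hcur
        refine ih [] acc (Or.inr ?_)
        rcases h with h | h
        · exact absurd (by simpa using hcur) h
        · exact h
      · exact ih [] (cur.reverse :: acc) (Or.inr (by simp))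
    · rw [if_neg hws]
      exact ih (c :: cur) acc (Or.inl (by simp))

theorem split₀_ne_nil (c : Char) (t : List Char) (hc : PySem.Chars.isspace c = false) :
    PySem.Chars.split₀ (c :: t) ≠ [] := by
  rw [PySem.Chars.split₀, PySem.Chars.split₀.go, if_neg (by simp [hc])]
  exact split₀_go_ne_nil t [c] [] (Or.inl (by simp))

theorem dropWhile_head_false (p : Char → Bool) (l : List Char) (c : Char) (t : List Char)
    (h : l.dropWhile p = c :: t) : p c = false := by
  have := List.head_dropWhile_not p (l := l) (by simp [h])
  simpa [h] using this

-- shape of split(None, 1): the second piece starts with a non-space character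
theorem split₀Max_one (s : List Char) (h : 2 ≤ (PySem.Chars.split₀Max s 1).length) :
    ∃ c t, (PySem.Chars.split₀Max s 1)[1]! = c :: t ∧ PySem.Chars.isspace c = false := by
  rw [PySem.Chars.split₀Max] at h ⊢
  rw [if_neg (by norm_num)] at h ⊢
  rw [show ((1:Int).toNat) = 1 from rfl] at h ⊢
  rw [PySem.Chars.split₀Max.go] at h ⊢
  rcases hd1 : List.dropWhile PySem.Chars.isspace s with _ | ⟨c1, t1⟩
  · rw [hd1] at h; simp at h
  · rw [hd1] at h
    have hs : s ≠ [] := by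
      intro hnil; rw [hnil] at hd1; simp at hd1
    rcases hlen : s.length with _ | k
    · exact absurd (List.length_eq_zero_iff.mp hlen) hs
    · simp only [hlen] at h ⊢
      change 2 ≤ (PySem.Chars.split₀Max.go (k+1) 0 _ _).length at h
      change ∃ c t, (PySem.Chars.split₀Max.go (k+1) 0 _ _)[1]! = c :: t ∧ _
      rw [PySem.Chars.split₀Max.go] at h ⊢
      rcases hd2 : List.dropWhile PySem.Chars.isspace
          (List.dropWhile (fun c => !PySem.Chars.isspace c) (c1 :: t1)) with _ | ⟨c2, t2⟩
      · rw [hd2] at h; simp at h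
      · rw [hd2] at h
        refine ⟨c2, t2, ?_, ?_⟩
        · simp
        · exact dropWhile_head_false _ _ _ _ hd2

-- ===== VERDICT (by name: the statement is the Claim_ definition above) =====
theorem contains_path_component_spec : Claim_equal_contains_path_component := by
  intro s c _
  show contains_path_component s c = contains_path_component_alt s c
  rw [contains_path_component, contains_path_component_alt]
  by_cases hg : (c.toList.any fun ch => ch == '/' || ch == '\\' || PySem.Chars.isspace ch) = true
  · rw [if_pos hg]
    by_cases hl : (PySem.Chars.split₀Max s.toList 1).length < 2
    · simp [hl]
    · rw [if_neg hl]
      obtain ⟨bad, hbadmem, hbad⟩ := List.any_eq_true.mp hg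
      apply List.any_eq_false.mpr
      intro arg harg hcontains
      have hmem : c.toList ∈ List.splitOnP (fun x => x == '/') (PySem.Chars.replace arg ['\\'] ['/']) := by
        rw [splitOn_char] at hcontains
        exact List.contains_iff_mem.mp hcontains
      have hbad' : (bad = '/' ∨ bad = '\\') ∨ PySem.Chars.isspace bad = true := by
        simpa using hbad
      rcases hbad' with (h1 | h1) | h1
      · have := mem_splitOnP_not _ _ _ hmem bad hbadmem
        simp [h1] at this
      · have hin := mem_splitOnP_subset _ _ _ hmem bad hbadmem
        rw [replace_single] at hin
        simp only [List.mem_map] at hin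
        obtain ⟨d, hd, hfd⟩ := hin
        by_cases hdb : d = '\\'
        · rw [if_pos hdb] at hfd
          rw [h1] at hfd
          exact absurd hfd (by decide)
        · rw [if_neg hdb] at hfd
          exact hdb (hfd.trans h1)
      · have hin := mem_splitOnP_subset _ _ _ hmem bad hbadmem
        rw [replace_single] at hin
        simp only [List.mem_map] at hin
        obtain ⟨d, hd, hfd⟩ := hin
        by_cases hdb : d = '\\'
        · rw [if_pos hdb] at hfd
          rw [← hfd] at h1
          exact absurd h1 (by decide)
        · rw [if_neg hdb] at hfd
          rw [← hfd] at h1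
          exact absurd h1 (by simpa using split₀_no_ws _ _ harg d hd)
  · rw [if_neg hg]
    have hcslash : ∀ ch ∈ c.toList, ch ≠ '/' := by
      intro ch hch heq
      exact hg (List.any_eq_true.mpr ⟨ch, hch, by simp [heq]⟩)
    by_cases hl : (PySem.Chars.split₀Max s.toList 1).length < 2
    · rw [if_pos hl, if_pos hl]
    · rw [if_neg hl, if_neg hl]
      obtain ⟨c1, t1, hat, hc1⟩ := split₀Max_one s.toList (by omega)
      have htoks : PySem.Chars.split₀ (PySem.Chars.split₀Max s.toList 1)[1]! ≠ [] := by
        rw [hat]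
        exact split₀_ne_nil c1 t1 hc1
      rw [Bool.eq_iff_iff]
      rw [PySem.Chars.isIn_iff_infix]
      have hjoin : PySem.Chars.join ['/']
          ((PySem.Chars.split₀ (PySem.Chars.split₀Max s.toList 1)[1]!).map
            (fun t => PySem.Chars.replace t ['\\'] ['/']))
          = List.intercalate ['/']
            ((PySem.Chars.split₀ (PySem.Chars.split₀Max s.toList 1)[1]!).map
              (fun t => PySem.Chars.replace t ['\\'] ['/'])) := rfl
      rw [show ('/' :: c.toList ++ ['/']) = '/' :: (c.toList ++ ['/']) from rfl]
      rw [infix_slash_iff c.toList hcslash, hjoin]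
      have hreps : ((PySem.Chars.split₀ (PySem.Chars.split₀Max s.toList 1)[1]!).map
          (fun t => PySem.Chars.replace t ['\\'] ['/'])) ≠ [] := by
        simpa using htoks
      rw [List.cons_append, List.splitOnP_cons]
      simp only [beq_self_eq_true, if_pos, List.drop_succ_cons, List.drop_zero]
      rw [splitOnP_append_sep, List.splitOnP_nil, splitOnP_intercalate _ hreps,
        List.dropLast_concat]
      rw [List.any_eq_true]
      constructor
      · rintro ⟨arg, harg, hcont⟩
        rw [splitOn_char] at hcont
        rw [List.mem_flatMap]
        exact ⟨PySem.Chars.replace arg ['\\'] ['/'], List.mem_map_of_mem harg,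
          List.contains_iff_mem.mp hcont⟩
      · intro hmem
        rw [List.mem_flatMap] at hmem
        obtain ⟨rp, hrp, hmem2⟩ := hmem
        obtain ⟨arg, harg, rfl⟩ := List.mem_map.mp hrp
        exact ⟨arg, harg, by rw [splitOn_char]; exact List.contains_iff_mem.mpr hmem2⟩
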